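-- pv_equiv track=rewrite | github.com/shhuan1989/algorithms | py/google/IOforWomen/B_Dreary_Design.py | solve3
-- ===== SOURCE A (Python) =====
-- def solve3(K, V):
--     """
--     在solve2的基础上， 其实我们直接计算r从0到V时候的值，
--     然后V时候的值就是中间重复的值。
--
--     :param K:
--     :param V:
--     :return:
--     """
--     result = 0
--     for r in range(V+1):
--         count = 0
--         for g in range(max(0, r-V), min(r+V, K)+1):
--             bmax = min(r+V, g+V, K)
--             bmin = max(0, r-V, g-V)
--             count = bmax - bmin - 1
--         if r == V:
--             result *= 2 # 前面r取[0, V-]时候的数量和后面对称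
--             result += count * (K-2*V+1) # 中间部分
--         else:
--             result += count
--     return result
-- ===== SOURCE B (Python) =====
-- def solve3(K, V):
--     # Closed form: A's inner loop only keeps its last iteration's value, which
--     # equals V-1 when r+V <= K and min(K,V)-1 otherwise (0 if the range is empty,
--     # i.e. K < 0).  Summing that over r in [0, V-1] in closed form and applying
--     # the r == V step gives an O(1) formula.
--     if V < 0:
--         return 0
--     if K < 0:
--         return 0
--     n1 = min(max(K - V + 1, 0), V)          # how many r in [0, V-1] have r + V <= K
--     S = n1 * (V - 1) + (V - n1) * (min(K, V) - 1)
--     cV = (V - 1) if 2 * V <= K else (min(K, V) - 1)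
--     return 2 * S + cV * (K - 2 * V + 1)
-- ===== Notes on version B (the rewrite author's own statement) =====
-- stated objective: faster
-- what changed: Replaced the nested O(V*K) loops by an O(1) closed formula: the inner loop only keeps its last iteration's value (V-1 when r+V<=K, min(K,V)-1 otherwise, 0 when K<0), and the sum of those values over r in [0,V-1] is computed in closed form.
import Mathlib
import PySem

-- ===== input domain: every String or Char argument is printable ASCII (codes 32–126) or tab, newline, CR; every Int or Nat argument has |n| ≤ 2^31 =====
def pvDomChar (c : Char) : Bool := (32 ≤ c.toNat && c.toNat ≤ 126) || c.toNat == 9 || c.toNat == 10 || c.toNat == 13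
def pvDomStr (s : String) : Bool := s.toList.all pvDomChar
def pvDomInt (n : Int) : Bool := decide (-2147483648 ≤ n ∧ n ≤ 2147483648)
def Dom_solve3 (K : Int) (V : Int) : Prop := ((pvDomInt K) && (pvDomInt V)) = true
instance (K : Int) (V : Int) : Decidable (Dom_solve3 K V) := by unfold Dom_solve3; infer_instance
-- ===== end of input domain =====

-- B replaces A's nested loops by a closed formula (objective: faster).

-- ===== PORT A =====
def solve3 (K : Int) (V : Int) : Int :=
  (PySem.List.pyRange 0 (V + 1) 1).foldl (fun result r =>
    let count : Int :=
      (PySem.List.pyRange (max 0 (r - V)) (min (r + V) K + 1) 1).foldl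
        (fun _count g =>
          let bmax := min (min (r + V) (g + V)) K
          let bmin := max (max 0 (r - V)) (g - V)
          bmax - bmin - 1) 0
    if r == V then result * 2 + count * (K - 2 * V + 1)
    else result + count) 0

-- ===== PORT B =====
def solve3_alt (K : Int) (V : Int) : Int :=
  if V < 0 then 0
  else if K < 0 then 0
  else
    let n1 := min (max (K - V + 1) 0) V
    let S := n1 * (V - 1) + (V - n1) * (min K V - 1)
    let cV := if 2 * V ≤ K then V - 1 else min K V - 1
    2 * S + cV * (K - 2 * V + 1)

-- ===== PRECONDITION & SPEC =====
def Spec_solve3 (K : Int) (V : Int) (out : Int) : Prop := out = solve3_alt K V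
instance (K : Int) (V : Int) (out : Int) : Decidable (Spec_solve3 K V out) := by unfold Spec_solve3; infer_instance

-- ===== CLAIM (what is proved, stated in full; the proofs are below) =====
def Claim_equal_solve3 : Prop := ∀ (K : Int) (V : Int), Dom_solve3 K V → Spec_solve3 K V (solve3 K V)

-- ===== LEMMAS AND PROOFS =====

-- closed form of A's inner loop (it keeps only the last iteration's value)
def cnt (K V r : Int) : Int :=
  if K < 0 then 0 else if r + V ≤ K then V - 1 else min K V - 1

lemma inner_eq (K V r : Int) (h0 : 0 ≤ r) (hr : r ≤ V) :
    (PySem.List.pyRange (max 0 (r - V)) (min (r + V) K + 1) 1).foldl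
      (fun _count g =>
        let bmax := min (min (r + V) (g + V)) K
        let bmin := max (max 0 (r - V)) (g - V)
        bmax - bmin - 1) 0 = cnt K V r := by
  by_cases hK : K < 0
  · rw [PySem.List.pyRange_one_eq_nil (by omega)]
    simp [cnt, hK]
  · have h2 : (0:Int) ≤ min (r + V) K := by omega
    have h1 : max 0 (r - V) = 0 := by omega
    rw [h1, PySem.List.pyRange_one_succ_right h2, List.foldl_append]
    simp only [List.foldl_cons, List.foldl_nil, cnt, if_neg hK]
    split_ifs with h <;> omega

lemma sum_cnt (K V : Int) (hK : ¬ K < 0) : ∀ (n : Nat),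
    ((PySem.List.pyRange 0 (n : Int) 1).map (cnt K V)).sum
      = (min (max (K - V + 1) 0) (n : Int)) * (V - 1)
        + ((n : Int) - min (max (K - V + 1) 0) (n : Int)) * (min K V - 1) := by
  intro n
  induction n with
  | zero => simp [PySem.List.pyRange_one_eq_nil]
  | succ n ih =>
    have hc : ((n + 1 : Nat) : Int) = (n : Int) + 1 := by push_cast; ring
    rw [hc, PySem.List.pyRange_one_succ_right (by positivity), List.map_append,
      List.sum_append, ih]
    simp only [List.map_cons, List.map_nil, List.sum_cons, List.sum_nil]
    by_cases h : (n : Int) + V ≤ K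
    · have e1 : min (max (K - V + 1) 0) ((n : Int) + 1) = (n : Int) + 1 := by omega
      have e2 : min (max (K - V + 1) 0) (n : Int) = (n : Int) := by omega
      rw [e1, e2, cnt, if_neg hK, if_pos h]; ring
    · have e1 : min (max (K - V + 1) 0) ((n : Int) + 1)
          = min (max (K - V + 1) 0) (n : Int) := by omega
      rw [e1, cnt, if_neg hK, if_neg h]; ring

-- ===== VERDICT (by name: the statement is the Claim_ definition above) =====
theorem solve3_spec : Claim_equal_solve3 := by
  intro K V _
  unfold Spec_solve3 solve3 solve3_alt
  by_cases hV : V < 0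
  · rw [PySem.List.pyRange_one_eq_nil (by omega)]
    simp [hV]
  · rw [not_lt] at hV
    rw [PySem.List.pyRange_one_succ_right (by omega : (0:Int) ≤ V), List.foldl_append]
    have hpre : (PySem.List.pyRange 0 V 1).foldl (fun result r =>
        let count : Int :=
          (PySem.List.pyRange (max 0 (r - V)) (min (r + V) K + 1) 1).foldl
            (fun _count g =>
              let bmax := min (min (r + V) (g + V)) K
              let bmin := max (max 0 (r - V)) (g - V)
              bmax - bmin - 1) 0
        if r == V then result * 2 + count * (K - 2 * V + 1)
        else result + count) 0
        = (PySem.List.pyRange 0 V 1).foldl (fun result r => result + cnt K V r) 0 := by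
      refine PySem.List.foldl_congr_mem _ _ _ _ ?_
      intro acc r hr
      rw [PySem.List.mem_pyRange_one] at hr
      simp only
      rw [inner_eq K V r hr.1 (by omega)]
      rw [if_neg (by simp only [beq_iff_eq]; omega)]
    rw [hpre, PySem.List.foldl_add]
    simp only [List.foldl_cons, List.foldl_nil, beq_self_eq_true, if_pos]
    rw [inner_eq K V V hV le_rfl]
    have hVc : ((V.toNat : Nat) : Int) = V := Int.toNat_of_nonneg hV
    rw [show (PySem.List.pyRange 0 V 1) = (PySem.List.pyRange 0 ((V.toNat : Nat) : Int) 1) from by rw [hVc]]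
    by_cases hK : K < 0
    · have hz : ((PySem.List.pyRange 0 ((V.toNat : Nat) : Int) 1).map (cnt K V)).sum = 0 := by
        have hcz : cnt K V = fun _ => (0 : Int) := funext fun r => if_pos hK
        simp [hcz]
      rw [hz, cnt, if_pos hK]
      simp [hK, show ¬ V < 0 by omega]
    · rw [sum_cnt K V hK V.toNat, hVc]
      simp only [cnt, if_neg hK, if_neg (by omega : ¬ V < 0)]
      by_cases h2 : 2 * V ≤ K
      · rw [if_pos (by omega : V + V ≤ K), if_pos h2]; ring
      · rw [if_neg (by omega : ¬ V + V ≤ K), if_neg h2]; ring
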